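-- pv_equiv track=rewrite | github.com/ezio37337/Timetabling-Project | main.py | same_course_in_multiple_slots_violated
-- ===== SOURCE A (Python) =====
-- def same_course_in_multiple_slots_violated(timetable):
--     # Create a dictionary to store the timeslots for each course
--     course_timeslots = {}
--
--     # Check each slot in the timetable
--     for (room, timeslot), course in timetable['slots'].items():
--         # If the course is not in the dictionary, add it with a set containing the current timeslot
--         if course not in course_timeslots:
--             course_timeslots[course] = {timeslot}
--         else:
--             # If the course is already in the dictionary, check if the timeslot is already in the set
--             if timeslot in course_timeslots[course]:
--                 # If the course is already in the same timeslot, return True (violated)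
--                 return True
--             else:
--                 # Otherwise, add the timeslot to the set for this course
--                 course_timeslots[course].add(timeslot)
--
--     # If no violations were found, return False
--     return False
-- ===== SOURCE B (Python) =====
-- def _has_dup(pairs):
--     # Brute-force duplicate detection by structural recursion:
--     # a list has a repeat iff its head occurs in its tail, or its tail has a repeat.
--     if not pairs:
--         return False
--     head, rest = pairs[0], pairs[1:]
--     if head in rest:
--         return True
--     return _has_dup(rest)
--
--
-- def same_course_in_multiple_slots_violated(timetable):
--     pairs = [(course, timeslot) for (room, timeslot), course in timetable['slots'].items()]
--     return _has_dup(pairs)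
-- ===== Notes on version B (the rewrite author's own statement) =====
-- stated objective: alternative
-- what changed: Replaces A's incremental dict-of-sets hashing with early exit by a recursive brute-force pairwise scan: collect all (course, timeslot) pairs, then recursively test whether any head occurs in its tail (no dict or set at all).
-- outside the precondition, e.g. on same_course_in_multiple_slots_violated({}): A raises KeyError, B raises KeyError
import Mathlib
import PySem

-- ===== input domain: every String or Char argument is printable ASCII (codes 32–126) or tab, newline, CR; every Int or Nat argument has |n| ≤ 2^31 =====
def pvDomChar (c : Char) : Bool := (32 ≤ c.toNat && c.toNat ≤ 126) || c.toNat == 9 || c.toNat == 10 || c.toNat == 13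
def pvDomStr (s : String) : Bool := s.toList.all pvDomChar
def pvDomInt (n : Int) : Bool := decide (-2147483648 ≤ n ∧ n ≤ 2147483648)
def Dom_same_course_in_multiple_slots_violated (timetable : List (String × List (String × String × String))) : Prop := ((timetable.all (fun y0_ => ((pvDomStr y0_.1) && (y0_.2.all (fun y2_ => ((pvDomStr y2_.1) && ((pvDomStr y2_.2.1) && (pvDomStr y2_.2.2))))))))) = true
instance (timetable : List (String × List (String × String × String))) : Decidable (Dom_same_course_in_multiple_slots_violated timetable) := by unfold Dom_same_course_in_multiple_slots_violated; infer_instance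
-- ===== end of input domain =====

-- B replaces A's incremental dict-of-sets membership check (with early exit) by a recursive
-- brute-force pairwise scan over the collected (course, timeslot) pairs: no dict/set, a different algorithm of higher cost.


-- ===== PORT A =====
-- the loop 'for (room, timeslot), course in timetable['slots'].items(): …' with the course_timeslots dict
def pvGoA : List (String × String × String) → PySem.Dict String (PySem.Set String) → Bool
  | [], _ => false
  | (_room, timeslot, course) :: rest, courseTimeslots =>
    match courseTimeslots.get? course with
    | none => pvGoA rest (courseTimeslots.insert course (PySem.Set.ofList [timeslot]))
    | some s =>
      if PySem.Set.contains s timeslot then true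
      else pvGoA rest (courseTimeslots.insert course (PySem.Set.add s timeslot))

def same_course_in_multiple_slots_violated (timetable : List (String × List (String × String × String))) : Bool :=
  match PySem.Dict.get? ⟨timetable⟩ "slots" with
  | none => false  -- unreachable under Pre_: Python raises KeyError here
  | some slots => pvGoA slots (PySem.Dict.mk [])

-- ===== PORT B =====
-- '_has_dup': a list has a repeat iff its head occurs in its tail, or its tail has a repeat
def pvHasDup : List (String × String) → Bool
  | [] => false
  | p :: rest => if p ∈ rest then true else pvHasDup rest

def same_course_in_multiple_slots_violated_alt (timetable : List (String × List (String × String × String))) : Bool :=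
  match PySem.Dict.get? ⟨timetable⟩ "slots" with
  | none => false  -- unreachable under Pre_: Python raises KeyError here
  | some slots => pvHasDup (slots.map (fun e => (e.2.2, e.2.1)))

-- ===== PRECONDITION & SPEC =====
-- Pre_ excludes exactly the inputs where timetable['slots'] raises KeyError (no 'slots' key).
def Pre_same_course_in_multiple_slots_violated (timetable : List (String × List (String × String × String))) : Prop :=
  "slots" ∈ timetable.map Prod.fst
instance (timetable : List (String × List (String × String × String))) : Decidable (Pre_same_course_in_multiple_slots_violated timetable) := by unfold Pre_same_course_in_multiple_slots_violated; infer_instance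
def pvWitness_same_course_in_multiple_slots_violated : (List (String × List (String × String × String))) :=
  [("slots", [("r1", "t1", "c1"), ("r2", "t1", "c1")])]

def Spec_same_course_in_multiple_slots_violated (timetable : List (String × List (String × String × String))) (out : Bool) : Prop := out = same_course_in_multiple_slots_violated_alt timetable
instance (timetable : List (String × List (String × String × String))) (out : Bool) : Decidable (Spec_same_course_in_multiple_slots_violated timetable out) := by unfold Spec_same_course_in_multiple_slots_violated; infer_instance

-- ===== CLAIM (what is proved, stated in full; the proofs are below) =====
def Claim_equal_same_course_in_multiple_slots_violated : Prop := ∀ (timetable : List (String × List (String × String × String))), Dom_same_course_in_multiple_slots_violated timetable → Pre_same_course_in_multiple_slots_violated timetable → Spec_same_course_in_multiple_slots_violated timetable (same_course_in_multiple_slots_violated timetable)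

-- ===== LEMMAS AND PROOFS =====

-- the (course, timeslot) pair of a slot entry (room, timeslot, course)
def pvPair (e : String × String × String) : String × String := (e.2.2, e.2.1)

-- abstraction of A's state: is the pair (course, timeslot) already recorded?
def pvMemD (d : PySem.Dict String (PySem.Set String)) (p : String × String) : Bool :=
  match d.get? p.1 with
  | some s => PySem.Set.contains s p.2
  | none => false

lemma pvMemD_insert_new (d : PySem.Dict String (PySem.Set String)) (c ts : String)
    (h : d.get? c = none) (q : String × String) :
    pvMemD (d.insert c (PySem.Set.ofList [ts])) q = (decide (q = (c, ts)) || pvMemD d q) := by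
  rcases q with ⟨q1, q2⟩
  by_cases hc : q1 = c
  · subst hc
    simp only [pvMemD, PySem.Dict.get?_insert_self d q1 _, h]
    show List.contains (PySem.Set.ofList [ts]) q2 = _
    have : (PySem.Set.ofList [ts] : List String) = [ts] := rfl
    rw [this, List.contains_eq_mem]
    simp [Prod.ext_iff, eq_comm]
  · simp only [pvMemD, PySem.Dict.get?_insert_of_ne d _ hc]
    simp [Prod.ext_iff, hc]

lemma pvMemD_insert_add (d : PySem.Dict String (PySem.Set String)) (c ts : String)
    (s : PySem.Set String) (h : d.get? c = some s) (q : String × String) :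
    pvMemD (d.insert c (PySem.Set.add s ts)) q = (decide (q = (c, ts)) || pvMemD d q) := by
  rcases q with ⟨q1, q2⟩
  by_cases hc : q1 = c
  · subst hc
    simp only [pvMemD, PySem.Dict.get?_insert_self d q1 _, h]
    show List.contains (PySem.Set.add s ts) q2 = (decide ((q1, q2) = (q1, ts)) || List.contains s q2)
    rw [List.contains_eq_mem, List.contains_eq_mem]
    have hmem := PySem.Set.mem_add s ts q2
    simp only [Prod.ext_iff, true_and]
    by_cases h2 : q2 ∈ s <;> by_cases h3 : q2 = ts <;> simp [h2, h3, hmem]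
  · simp only [pvMemD, PySem.Dict.get?_insert_of_ne d _ hc]
    simp [Prod.ext_iff, hc]

-- A's loop detects a pair already in the state, or a duplicate pair further on
lemma pvGoA_iff : ∀ (l : List (String × String × String)) (d : PySem.Dict String (PySem.Set String)),
    pvGoA l d = true ↔ (∃ q ∈ l.map pvPair, pvMemD d q = true) ∨ ¬ (l.map pvPair).Nodup := by
  intro l
  induction l with
  | nil => intro d; simp [pvGoA]
  | cons e rest ih =>
    intro d
    rcases e with ⟨room, ts, c⟩
    have hpair : pvPair (room, ts, c) = (c, ts) := rfl
    rcases hd : d.get? c with _ | s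
    · rw [show pvGoA ((room, ts, c) :: rest) d
            = pvGoA rest (d.insert c (PySem.Set.ofList [ts])) by simp only [pvGoA, hd]]
      rw [ih]
      have hm : pvMemD d (c, ts) = false := by simp [pvMemD, hd]
      simp only [List.map_cons, hpair, List.nodup_cons, List.mem_cons]
      constructor
      · rintro (⟨q, hq, hmem⟩ | hnd)
        · rw [pvMemD_insert_new d c ts hd q] at hmem
          rcases Bool.or_eq_true_iff.mp hmem with h1 | h1
          · right; intro ⟨h2, _⟩; exact h2 (by rw [← of_decide_eq_true h1]; exact hq)
          · exact Or.inl ⟨q, Or.inr hq, h1⟩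
        · right; intro ⟨_, h2⟩; exact hnd h2
      · rintro (⟨q, hq, hmem⟩ | hnd)
        · rcases hq with rfl | hq
          · rw [hm] at hmem; exact absurd hmem (by simp)
          · exact Or.inl ⟨q, hq, by rw [pvMemD_insert_new d c ts hd q, hmem, Bool.or_true]⟩
        · by_cases hin : (c, ts) ∈ rest.map pvPair
          · exact Or.inl ⟨(c, ts), hin, by rw [pvMemD_insert_new d c ts hd (c, ts)]; simp⟩
          · exact Or.inr fun h2 => hnd ⟨hin, h2⟩
    · by_cases hts : PySem.Set.contains s ts
      · rw [show pvGoA ((room, ts, c) :: rest) d = true by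
              simp only [pvGoA, hd]; rw [if_pos hts]]
        have hm : pvMemD d (c, ts) = true := by simp only [pvMemD, hd]; exact hts
        simp only [List.map_cons, hpair, List.mem_cons]
        constructor
        · intro _; exact Or.inl ⟨(c, ts), Or.inl rfl, hm⟩
        · intro _; trivial
      · rw [show pvGoA ((room, ts, c) :: rest) d
              = pvGoA rest (d.insert c (PySem.Set.add s ts)) by
              simp only [pvGoA, hd]; rw [if_neg hts]]
        rw [ih]
        have hm : pvMemD d (c, ts) = false := by
          simp only [pvMemD, hd]; exact Bool.eq_false_iff.mpr hts
        simp only [List.map_cons, hpair, List.nodup_cons, List.mem_cons]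
        constructor
        · rintro (⟨q, hq, hmem⟩ | hnd)
          · rw [pvMemD_insert_add d c ts s hd q] at hmem
            rcases Bool.or_eq_true_iff.mp hmem with h1 | h1
            · right; intro ⟨h2, _⟩; exact h2 (by rw [← of_decide_eq_true h1]; exact hq)
            · exact Or.inl ⟨q, Or.inr hq, h1⟩
          · right; intro ⟨_, h2⟩; exact hnd h2
        · rintro (⟨q, hq, hmem⟩ | hnd)
          · rcases hq with rfl | hq
            · rw [hm] at hmem; exact absurd hmem (by simp)
            · exact Or.inl ⟨q, hq, by rw [pvMemD_insert_add d c ts s hd q, hmem, Bool.or_true]⟩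
          · by_cases hin : (c, ts) ∈ rest.map pvPair
            · exact Or.inl ⟨(c, ts), hin, by rw [pvMemD_insert_add d c ts s hd (c, ts)]; simp⟩
            · exact Or.inr fun h2 => hnd ⟨hin, h2⟩

-- B's recursive scan is exactly non-Nodup
lemma pvHasDup_iff (xs : List (String × String)) : pvHasDup xs = true ↔ ¬ xs.Nodup := by
  induction xs with
  | nil => simp [pvHasDup]
  | cons p rest ih =>
    simp only [pvHasDup, List.nodup_cons]
    by_cases hp : p ∈ rest
    · simp [hp]
    · simp [hp, ih]

lemma pvMemD_empty (q : String × String) : pvMemD (PySem.Dict.mk []) q = false := by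
  simp [pvMemD, PySem.Dict.get?]

-- ===== VERDICT (by name: the statement is the Claim_ definition above) =====
theorem same_course_in_multiple_slots_violated_spec : Claim_equal_same_course_in_multiple_slots_violated := by
  intro timetable _ hpre
  unfold Spec_same_course_in_multiple_slots_violated
  unfold same_course_in_multiple_slots_violated same_course_in_multiple_slots_violated_alt
  rcases h : PySem.Dict.get? ⟨timetable⟩ "slots" with _ | slots
  · -- Python raises KeyError here; Pre_ excludes this case
    exfalso
    obtain ⟨⟨k, v⟩, hmem, hk⟩ := List.mem_map.mp hpre
    have hfind : timetable.find? (fun p => p.1 == "slots") = none := by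
      simpa [PySem.Dict.get?, Option.map_eq_none_iff] using h
    have := List.find?_eq_none.mp hfind (k, v) hmem
    simp only at hk
    simp [hk] at this
  · show pvGoA slots (PySem.Dict.mk [])
      = pvHasDup (slots.map (fun e => (e.2.2, e.2.1)))
    have hpairs : slots.map (fun e : String × String × String => (e.2.2, e.2.1)) = slots.map pvPair := rfl
    have hA : pvGoA slots (PySem.Dict.mk []) = true ↔ ¬ (slots.map pvPair).Nodup := by
      rw [pvGoA_iff]
      simp [pvMemD_empty]
    have hB : pvHasDup (slots.map pvPair) = true ↔ ¬ (slots.map pvPair).Nodup :=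
      pvHasDup_iff _
    rw [hpairs, Bool.eq_iff_iff, hA, hB]
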